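-- pv_equiv track=rewrite | github.com/Romitha/seed-eu-qe | utils/common/yaml_generator_util.py | _get_fallback_test_scope
-- ===== SOURCE A (Python) =====
-- from typing import Any, Dict, List
--
-- def _get_fallback_test_scope(load_strategy: str) -> Dict[str, Any]:
--     """Get fallback test scope configuration"""
--     base_test_scope = {
--         'local': {
--             'source': {
--                 'data_validation': ['rule_checks'],
--                 'data_quality': ['timeliness', 'completeness', 'duplication', 'consistency', 'accuracy']
--             },
--             'target_lndp': {
--                 'data_validation': ['rule_checks'],
--                 'data_quality': ['timeliness', 'completeness', 'duplication', 'consistency', 'accuracy']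
--             },
--             'target_edwp': {
--                 'data_validation': ['rule_checks'],
--                 'data_quality': ['timeliness', 'completeness']
--             }
--         }
--     }
--
--     # Add additional scopes
--     for scope_name in ['cicd', 'etl']:
--         base_test_scope[scope_name] = {
--             'source': base_test_scope['local']['source'].copy(),
--             'target_lndp': base_test_scope['local']['target_lndp'].copy(),
--             'target_edwp': {
--                 'data_validation': ['rule_checks'],
--                 'data_quality': ['timeliness', 'completeness', 'duplication', 'consistency', 'accuracy',
--                                  'history_validation']
--             }
--         }
--
--     if load_strategy == 'scd':
--         for scope in base_test_scope.values():
--             if 'target_edwp' in scope: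
--                 scope['target_edwp']['data_validation'].append('scd_checks')
--
--     return base_test_scope
-- ===== SOURCE B (Python) =====
-- def _get_fallback_test_scope(load_strategy: str):
--     """Get fallback test scope configuration"""
--     def dv(section):
--         if section == 'target_edwp' and load_strategy == 'scd':
--             return ['rule_checks', 'scd_checks']
--         return ['rule_checks']
--
--     def dq(scope, section):
--         if section != 'target_edwp':
--             return ['timeliness', 'completeness', 'duplication', 'consistency', 'accuracy']
--         if scope == 'local':
--             return ['timeliness', 'completeness']
--         return ['timeliness', 'completeness', 'duplication', 'consistency', 'accuracy',
--                 'history_validation']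
--
--     return {scope: {section: {'data_validation': dv(section),
--                               'data_quality': dq(scope, section)}
--                     for section in ['source', 'target_lndp', 'target_edwp']}
--             for scope in ['local', 'cicd', 'etl']}
-- ===== Notes on version B (the rewrite author's own statement) =====
-- stated objective: simpler
-- what changed: B derives every entry from two rule functions dv(section) and dq(scope, section) over a nested comprehension scopes x sections, instead of A's literal-then-copy-then-mutate construction (build 'local', copy into 'cicd'/'etl', separate scd-append pass).
import Mathlib
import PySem

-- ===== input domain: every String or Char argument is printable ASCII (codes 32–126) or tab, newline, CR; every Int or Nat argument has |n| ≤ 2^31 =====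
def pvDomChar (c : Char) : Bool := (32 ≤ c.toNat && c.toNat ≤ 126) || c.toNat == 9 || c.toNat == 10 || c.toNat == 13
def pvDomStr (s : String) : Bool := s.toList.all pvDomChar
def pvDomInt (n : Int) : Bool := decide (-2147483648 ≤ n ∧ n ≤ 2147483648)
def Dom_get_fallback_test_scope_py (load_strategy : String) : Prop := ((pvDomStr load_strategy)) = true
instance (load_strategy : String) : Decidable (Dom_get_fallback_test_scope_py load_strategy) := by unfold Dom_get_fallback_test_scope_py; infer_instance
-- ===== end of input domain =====

-- B computes every entry from rule functions over a nested scopes×sections comprehension instead of A's build-copy-mutate construction (simpler decomposition).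

-- ===== PORT A =====
-- dict-of-dicts literals become insertion-ordered association lists; all keys are distinct
-- literals, so dict insertion of a new key is exactly list append (exact here).
def get_fallback_test_scope_py (load_strategy : String) : List (String × List (String × List (String × List String))) :=
  -- base_test_scope = {'local': …}
  let base : List (String × List (String × List (String × List String))) :=
    [("local",
      [("source", [("data_validation", ["rule_checks"]),
                   ("data_quality", ["timeliness", "completeness", "duplication", "consistency", "accuracy"])]),
       ("target_lndp", [("data_validation", ["rule_checks"]),
                        ("data_quality", ["timeliness", "completeness", "duplication", "consistency", "accuracy"])]),
       ("target_edwp", [("data_validation", ["rule_checks"]),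
                        ("data_quality", ["timeliness", "completeness"])])])]
  -- for scope_name in ['cicd', 'etl']: base_test_scope[scope_name] = {… .copy() …}
  -- (.copy() of a dict value is a value copy here; the first scope is read back unchanged at this point)
  let base := ["cicd", "etl"].foldl (fun b scope_name =>
    b ++ [(scope_name,
      [("source", [("data_validation", ["rule_checks"]),
                   ("data_quality", ["timeliness", "completeness", "duplication", "consistency", "accuracy"])]),
       ("target_lndp", [("data_validation", ["rule_checks"]),
                        ("data_quality", ["timeliness", "completeness", "duplication", "consistency", "accuracy"])]),
       ("target_edwp", [("data_validation", ["rule_checks"]),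
                        ("data_quality", ["timeliness", "completeness", "duplication", "consistency", "accuracy",
                                          "history_validation"])])])]) base
  -- if load_strategy == 'scd': for scope in values: scope['target_edwp']['data_validation'].append('scd_checks')
  if load_strategy == "scd" then
    base.map (fun p => (p.1, p.2.map (fun q =>
      if q.1 == "target_edwp" then
        (q.1, q.2.map (fun r => if r.1 == "data_validation" then (r.1, r.2 ++ ["scd_checks"]) else r))
      else q)))
  else
    base

-- ===== PORT B =====
-- helper dv(section): data_validation rule
def pvAltDv (load_strategy sect : String) : List String :=
  if sect == "target_edwp" && load_strategy == "scd" then ["rule_checks", "scd_checks"]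
  else ["rule_checks"]

-- helper dq(scope, sect): data_quality rule
def pvAltDq (scope sect : String) : List String :=
  if sect != "target_edwp" then ["timeliness", "completeness", "duplication", "consistency", "accuracy"]
  else if scope == "local" then ["timeliness", "completeness"]
  else ["timeliness", "completeness", "duplication", "consistency", "accuracy", "history_validation"]

def get_fallback_test_scope_py_alt (load_strategy : String) : List (String × List (String × List (String × List String))) :=
  ["local", "cicd", "etl"].map (fun scope =>
    (scope, ["source", "target_lndp", "target_edwp"].map (fun sect =>
      (sect, [("data_validation", pvAltDv load_strategy sect),
                 ("data_quality", pvAltDq scope sect)]))))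

-- ===== PRECONDITION & SPEC =====
def Spec_get_fallback_test_scope_py (load_strategy : String) (out : List (String × List (String × List (String × List String)))) : Prop := out = get_fallback_test_scope_py_alt load_strategy
instance (load_strategy : String) (out : List (String × List (String × List (String × List String)))) : Decidable (Spec_get_fallback_test_scope_py load_strategy out) := by unfold Spec_get_fallback_test_scope_py; infer_instance

-- ===== CLAIM =====
def Claim_equal_get_fallback_test_scope_py : Prop := ∀ (load_strategy : String), Dom_get_fallback_test_scope_py load_strategy → Spec_get_fallback_test_scope_py load_strategy (get_fallback_test_scope_py load_strategy)

-- ===== LEMMAS AND PROOFS =====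

-- ===== VERDICT =====
theorem get_fallback_test_scope_py_spec : Claim_equal_get_fallback_test_scope_py := by
  intro load_strategy _
  unfold Spec_get_fallback_test_scope_py get_fallback_test_scope_py get_fallback_test_scope_py_alt pvAltDv pvAltDq
  by_cases h : load_strategy = "scd"
  · subst h; rfl
  · have hb : (load_strategy == "scd") = false := beq_eq_false_iff_ne.mpr h
    simp only [List.foldl, List.map, hb, Bool.and_false, Bool.false_eq_true, if_false]
    rfl
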